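-- pv_equiv track=rewrite | github.com/taigosant/Ebagens | TP2/geraresultados.py | listaMaior
-- ===== SOURCE A (Python) =====
-- def compara(lista, valor,limiar):
--     for x in range(len(lista)):
--         if( abs( valor-lista[x])<= limiar):
--             return 1
--     return 0
--
-- def listaMaior(l1,l2,limiar):
--     totalEncontrado=0
--     if(len(l1)>=len(l2)):
--         for x in range(len(l2)):
--             if(compara(l1,l2[x],limiar)):
--                 totalEncontrado=totalEncontrado	+1
--     else:
--         for x in range(len(l1)):
--             if(compara(l2,l1[x],limiar)):
--                 totalEncontrado=totalEncontrado	+1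
--     return totalEncontrado
-- ===== SOURCE B (Python) =====
-- def listaMaior(l1, l2, limiar):
--     # Sort the longer list once, then binary-search the interval
--     # [v - limiar, v + limiar] for each element v of the shorter list.
--     if len(l1) >= len(l2):
--         maior, menor = l1, l2
--     else:
--         maior, menor = l2, l1
--     s = sorted(maior)
--     total = 0
--     for v in menor:
--         # standard bisect_left for key v - limiar
--         lo, hi = 0, len(s)
--         key = v - limiar
--         while lo < hi:
--             mid = (lo + hi) // 2
--             if s[mid] < key:
--                 lo = mid + 1
--             else:
--                 hi = mid
--         if lo < len(s) and s[lo] <= v + limiar: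
--             total += 1
--     return total
-- ===== Notes on version B (the rewrite author's own statement) =====
-- stated objective: faster
-- what changed: Instead of a linear scan of the longer list for every element of the shorter list, B sorts the longer list once and decides each 'is anything within limiar' query by a binary search for the interval [v-limiar, v+limiar].
import Mathlib
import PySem

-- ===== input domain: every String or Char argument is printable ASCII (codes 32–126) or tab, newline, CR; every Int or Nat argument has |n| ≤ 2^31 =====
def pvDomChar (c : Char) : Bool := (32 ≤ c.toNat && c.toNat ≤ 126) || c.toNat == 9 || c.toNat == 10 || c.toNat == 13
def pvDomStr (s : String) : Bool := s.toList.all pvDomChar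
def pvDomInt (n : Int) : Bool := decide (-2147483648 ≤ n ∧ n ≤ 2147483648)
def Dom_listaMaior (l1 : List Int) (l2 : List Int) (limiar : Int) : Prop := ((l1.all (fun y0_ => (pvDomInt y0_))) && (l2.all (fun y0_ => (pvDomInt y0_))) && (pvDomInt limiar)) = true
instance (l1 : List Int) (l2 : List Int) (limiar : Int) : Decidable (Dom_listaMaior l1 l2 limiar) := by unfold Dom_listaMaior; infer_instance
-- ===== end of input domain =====

-- B sorts the longer list once and answers each proximity query by binary search (bisect_left),
-- replacing A's linear scan per element: asymptotically faster, same value on every input.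


-- ===== PORT A =====
-- for x in range(len(lista)): if abs(valor-lista[x]) <= limiar: return 1; / return 0
def compara (lista : List Int) (valor : Int) (limiar : Int) : Int :=
  match lista with
  | [] => 0
  | a :: t => if |valor - a| ≤ limiar then 1 else compara t valor limiar

def listaMaior (l1 : List Int) (l2 : List Int) (limiar : Int) : Int :=
  if l1.length ≥ l2.length then
    l2.foldl (fun tot v => if compara l1 v limiar = 1 then tot + 1 else tot) 0
  else
    l1.foldl (fun tot v => if compara l2 v limiar = 1 then tot + 1 else tot) 0

-- ===== PORT B =====
-- Source B's hand-written while-loop is the standard bisect_left; PySem.List.bisectLeft is that same loop.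
def listaMaior_alt (l1 : List Int) (l2 : List Int) (limiar : Int) : Int :=
  let p := if l1.length ≥ l2.length then (l1, l2) else (l2, l1)
  let s := PySem.List.sorted p.1 (fun x => x) false
  p.2.foldl (fun tot v =>
    let lo := PySem.List.bisectLeft s (v - limiar)
    if h : lo < s.length then
      if s[lo] ≤ v + limiar then tot + 1 else tot
    else tot) 0

-- ===== PRECONDITION & SPEC =====
def Spec_listaMaior (l1 : List Int) (l2 : List Int) (limiar : Int) (out : Int) : Prop := out = listaMaior_alt l1 l2 limiar
instance (l1 : List Int) (l2 : List Int) (limiar : Int) (out : Int) : Decidable (Spec_listaMaior l1 l2 limiar out) := by unfold Spec_listaMaior; infer_instance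

-- ===== CLAIM (what is proved, stated in full; the proofs are below) =====
def Claim_equal_listaMaior : Prop := ∀ (l1 : List Int) (l2 : List Int) (limiar : Int), Dom_listaMaior l1 l2 limiar → Spec_listaMaior l1 l2 limiar (listaMaior l1 l2 limiar)

-- ===== LEMMAS AND PROOFS =====

-- A's helper decides existence of a close element.
theorem compara_eq (lista : List Int) (valor limiar : Int) :
    compara lista valor limiar = if ∃ x ∈ lista, |valor - x| ≤ limiar then 1 else 0 := by
  induction lista with
  | nil => simp [compara]
  | cons a t ih =>
    simp only [compara, ih]
    by_cases h : |valor - a| ≤ limiar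
    · have hex : ∃ x ∈ a :: t, |valor - x| ≤ limiar := ⟨a, List.mem_cons_self, h⟩
      simp [h]
    · have hiff : (∃ x ∈ a :: t, |valor - x| ≤ limiar) ↔ (∃ x ∈ t, |valor - x| ≤ limiar) := by
        constructor
        · rintro ⟨x, hx, hxl⟩
          rcases List.mem_cons.mp hx with rfl | hx'
          · exact absurd hxl h
          · exact ⟨x, hx', hxl⟩
        · rintro ⟨x, hx, hxl⟩; exact ⟨x, List.mem_cons_of_mem a hx, hxl⟩
      simp only [h, if_false, hiff]

-- B's binary-search test decides the same existence over the sorted copy.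
theorem bisect_test_eq (m : List Int) (v limiar : Int)
    (s : List Int) (hs : s = PySem.List.sorted m (fun x => x) false)
    (lo : Nat) (hlo : lo = PySem.List.bisectLeft s (v - limiar)) :
    (∃ h : lo < s.length, s[lo]'h ≤ v + limiar) ↔ ∃ x ∈ m, |v - x| ≤ limiar := by
  have hpw : List.Pairwise (fun a b => a ≤ b) s := by
    rw [hs]; exact PySem.List.sorted_pairwise m (fun x => x)
  have hmem : ∀ x : Int, x ∈ s ↔ x ∈ m := by
    intro x; rw [hs]; exact PySem.List.mem_sorted m (fun x => x) false x
  obtain ⟨hle, hbelow, habove⟩ := PySem.List.bisectLeft_spec s (v - limiar) hpw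
  rw [← hlo] at hle hbelow habove
  have hmono := List.pairwise_iff_getElem.mp hpw
  constructor
  · rintro ⟨h, hb⟩
    refine ⟨s[lo], (hmem _).mp (List.getElem_mem h), ?_⟩
    have h1 := habove lo h le_rfl
    rw [abs_le]; omega
  · rintro ⟨x, hx, hxl⟩
    obtain ⟨j, hj, hjx⟩ := List.mem_iff_getElem.mp ((hmem x).mpr hx)
    rw [abs_le] at hxl
    have hloj : lo ≤ j := by
      by_contra hc
      have := hbelow j hj (by omega)
      omega
    have h : lo < s.length := lt_of_le_of_lt hloj hj
    refine ⟨h, ?_⟩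
    rcases eq_or_lt_of_le hloj with rfl | hlt
    · omega
    · have := hmono lo j h hj hlt
      omega

theorem fold_eq (maior menor : List Int) (limiar : Int) (init : Int) :
    menor.foldl (fun tot v => if compara maior v limiar = 1 then tot + 1 else tot) init
      = menor.foldl (fun tot v =>
            let lo := PySem.List.bisectLeft (PySem.List.sorted maior (fun x => x) false) (v - limiar)
            if h : lo < (PySem.List.sorted maior (fun x => x) false).length then
              if (PySem.List.sorted maior (fun x => x) false)[lo] ≤ v + limiar then tot + 1 else tot
            else tot) init := by
  induction menor generalizing init with
  | nil => rfl
  | cons v t ih =>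
    simp only [List.foldl_cons]
    have heq : (if compara maior v limiar = 1 then init + 1 else init)
        = (let lo := PySem.List.bisectLeft (PySem.List.sorted maior (fun x => x) false) (v - limiar)
           if h : lo < (PySem.List.sorted maior (fun x => x) false).length then
             if (PySem.List.sorted maior (fun x => x) false)[lo] ≤ v + limiar then init + 1 else init
           else init) := by
      rw [compara_eq]
      by_cases hex : ∃ x ∈ maior, |v - x| ≤ limiar
      · obtain ⟨h, hb⟩ := (bisect_test_eq maior v limiar _ rfl _ rfl).mpr hex
        rw [PySem.List.length_sorted] at h
        simp [hex, h, hb]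
      · simp only [hex, if_false]
        by_cases h : PySem.List.bisectLeft (PySem.List.sorted maior (fun x => x) false) (v - limiar)
            < (PySem.List.sorted maior (fun x => x) false).length
        · have hb : ¬ (PySem.List.sorted maior (fun x => x) false)[PySem.List.bisectLeft (PySem.List.sorted maior (fun x => x) false) (v - limiar)] ≤ v + limiar := by
            intro hb
            exact hex ((bisect_test_eq maior v limiar _ rfl _ rfl).mp ⟨h, hb⟩)
          rw [PySem.List.length_sorted] at h
          simp [h, hb]
        · rw [PySem.List.length_sorted] at h
          simp [h]
    rw [heq]
    exact ih _

-- ===== VERDICT (by name: the statement is the Claim_ definition above) =====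
theorem listaMaior_spec : Claim_equal_listaMaior := by
  intro l1 l2 limiar _
  unfold Spec_listaMaior listaMaior listaMaior_alt
  by_cases h : l1.length ≥ l2.length
  · simp only [h, if_pos]
    exact fold_eq l1 l2 limiar 0
  · simp only [h, if_false]
    exact fold_eq l2 l1 limiar 0
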